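-- pv_equiv track=rewrite | github.com/Polymere/ADA_Group | project/src/pitch_analysis.py | _find_longest_true_sequence_position
-- ===== SOURCE A (Python) =====
-- from itertools import groupby
--
-- def _find_longest_true_sequence_position(pitch):
--     double_list = list(pitch)
--     double_list = double_list + double_list
--     max_length = 0
--     max_length_pos = 0
--     pos = 0
--     for k, g in groupby(double_list):
--         length = len([i for i in g])
--         pos += length
--         if k and length > max_length:
--             max_length = length
--             max_length_pos = pos - length
--     return max_length_pos
-- ===== SOURCE B (Python) =====
-- def _find_longest_true_sequence_position(pitch):
--     pitch = list(pitch)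
--     n = len(pitch)
--     runs = []  # maximal True runs as (start, length)
--     i = 0
--     while i < n:
--         if not pitch[i]:
--             i += 1
--             continue
--         j = i + 1
--         while j < n and pitch[j]:
--             j += 1
--         runs.append((i, j - i))
--         i = j
--     if not runs:
--         return 0
--     if pitch[0] and pitch[-1]:
--         s, l = runs[-1]
--         runs[-1] = (s, l + runs[0][1])
--     best_len, best_pos = 0, 0
--     for s, l in runs:
--         if l > best_len:
--             best_len, best_pos = l, s
--     return best_pos
-- ===== Notes on version B (the rewrite author's own statement) =====
-- stated objective: faster
-- what changed: B scans pitch once collecting maximal True runs as (start,length) pairs and merges the wrap run in O(1) instead of materialising and grouping a doubled copy of the list.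
import Mathlib
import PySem

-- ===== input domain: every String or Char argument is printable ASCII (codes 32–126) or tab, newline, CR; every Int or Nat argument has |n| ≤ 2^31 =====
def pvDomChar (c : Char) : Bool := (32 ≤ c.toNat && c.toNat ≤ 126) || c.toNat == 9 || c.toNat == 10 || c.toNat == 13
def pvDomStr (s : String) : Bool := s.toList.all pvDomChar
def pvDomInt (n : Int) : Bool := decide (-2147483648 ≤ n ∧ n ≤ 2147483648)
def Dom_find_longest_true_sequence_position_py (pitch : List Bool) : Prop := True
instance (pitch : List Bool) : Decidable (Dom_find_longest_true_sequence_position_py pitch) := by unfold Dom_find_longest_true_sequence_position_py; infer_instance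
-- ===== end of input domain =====

-- B replaces A's "double the list, groupby, scan groups" by a single pass over the
-- original list collecting maximal True runs and an O(1) merge of the wrapping run
-- (objective: faster by a constant factor — no doubled copy, no per-group throwaway list).

-- ===== PORT A =====
-- itertools.groupby of a Bool list, as (key, group length) pairs in order.
def pvStep (x : Bool) (gs : List (Bool × Nat)) : List (Bool × Nat) :=
  match gs with
  | [] => [(x, 1)]
  | (k, c) :: r => if k = x then (x, c + 1) :: r else (x, 1) :: (k, c) :: r

def pvGroups (l : List Bool) : List (Bool × Nat) := l.foldr pvStep []

def find_longest_true_sequence_position_py (pitch : List Bool) : Int :=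
  let double_list := pitch ++ pitch
  -- state = (max_length, max_length_pos, pos)
  let st := (pvGroups double_list).foldl
    (fun (st : Int × Int × Int) (g : Bool × Nat) =>
      let length : Int := g.2
      let pos := st.2.2 + length
      if g.1 && decide (length > st.1) then (length, pos - length, pos)
      else (st.1, st.2.1, pos))
    (0, 0, 0)
  st.2.1

-- ===== PORT B =====
-- single pass: maximal True runs of pitch as (start, length), in order
def pvRunsB : List Bool → Int → List (Int × Int)
  | [], _ => []
  | b :: xs, i =>
    if b then
      let t := (xs.takeWhile (fun x => x)).length
      (i, (1 : Int) + t) :: pvRunsB (xs.dropWhile (fun x => x)) (i + 1 + t)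
    else pvRunsB xs (i + 1)
  termination_by l _ => l.length
  decreasing_by
  · exact Nat.lt_succ_of_le (List.length_dropWhile_le _ _)
  · exact Nat.lt_succ_self _

def find_longest_true_sequence_position_py_alt (pitch : List Bool) : Int :=
  match pvRunsB pitch 0 with
  | [] => 0
  | r0 :: rest =>
    let runs := r0 :: rest
    let runs2 :=
      if pitch.headD false && pitch.getLastD false then
        runs.dropLast ++ [((runs.getLastD (0, 0)).1, (runs.getLastD (0, 0)).2 + r0.2)]
      else runs
    (runs2.foldl (fun best r => if r.2 > best.1 then (r.2, r.1) else best) ((0 : Int), (0 : Int))).2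

-- ===== PRECONDITION & SPEC =====
def Spec_find_longest_true_sequence_position_py (pitch : List Bool) (out : Int) : Prop := out = find_longest_true_sequence_position_py_alt pitch
instance (pitch : List Bool) (out : Int) : Decidable (Spec_find_longest_true_sequence_position_py pitch out) := by unfold Spec_find_longest_true_sequence_position_py; infer_instance

-- ===== CLAIM (what is proved, stated in full; the proofs are below) =====
def Claim_equal_find_longest_true_sequence_position_py : Prop := ∀ (pitch : List Bool), Dom_find_longest_true_sequence_position_py pitch → Spec_find_longest_true_sequence_position_py pitch (find_longest_true_sequence_position_py pitch)

-- ===== LEMMAS AND PROOFS =====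

-- positions of True groups, given a group list and a start offset
def pvTrueRuns : List (Bool × Nat) → Int → List (Int × Int)
  | [], _ => []
  | (k, c) :: gs, i => if k then (i, (c : Int)) :: pvTrueRuns gs (i + c) else pvTrueRuns gs (i + c)

def pvBest (rs : List (Int × Int)) (b : Int × Int) : Int × Int :=
  rs.foldl (fun best r => if r.2 > best.1 then (r.2, r.1) else best) b

def pvSumc (gs : List (Bool × Nat)) : Nat := (gs.map (·.2)).sum

def pvStep' (g : Bool × Nat) (hs : List (Bool × Nat)) : List (Bool × Nat) :=
  match hs with
  | [] => [g]
  | (k2, c2) :: r => if k2 = g.1 then (g.1, c2 + g.2) :: r else g :: (k2, c2) :: r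

def pvMergeG : List (Bool × Nat) → List (Bool × Nat) → List (Bool × Nat)
  | [], hs => hs
  | g :: gs, hs => pvStep' g (pvMergeG gs hs)

theorem pvStep_head (x : Bool) (gs : List (Bool × Nat)) :
    ∃ c r, pvStep x gs = (x, c) :: r := by
  match gs with
  | [] => exact ⟨1, [], rfl⟩
  | (k, c) :: r =>
    simp only [pvStep]
    split_ifs <;> exact ⟨_, _, rfl⟩

theorem pvStep'_head (g : Bool × Nat) (hs : List (Bool × Nat)) :
    ∃ c r, pvStep' g hs = (g.1, c) :: r := by
  match hs with
  | [] => exact ⟨g.2, [], by simp [pvStep']⟩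
  | (k2, c2) :: r =>
    simp only [pvStep']
    split_ifs <;> exact ⟨_, _, rfl⟩

theorem pvStep'_ne (g : Bool × Nat) (k2 : Bool) (c2 : Nat) (r : List (Bool × Nat))
    (h : k2 ≠ g.1) : pvStep' g ((k2, c2) :: r) = g :: (k2, c2) :: r := by
  simp [pvStep', h]

theorem pvStep_one (x : Bool) (hs : List (Bool × Nat)) : pvStep x hs = pvStep' (x, 1) hs := by
  match hs with
  | [] => rfl
  | (k2, c2) :: r => simp only [pvStep, pvStep']

theorem pvStep_step' (x : Bool) (c : Nat) (M : List (Bool × Nat)) :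
    pvStep x (pvStep' (x, c) M) = pvStep' (x, c + 1) M := by
  match M with
  | [] => simp [pvStep, pvStep']
  | (k2, c2) :: r =>
    simp only [pvStep', pvStep]
    split_ifs with h <;> simp [pvStep, Nat.add_assoc]

theorem pvStep_mergeG (x : Bool) (gs hs : List (Bool × Nat)) :
    pvStep x (pvMergeG gs hs) = pvMergeG (pvStep x gs) hs := by
  match gs with
  | [] => exact pvStep_one x hs
  | (k, c) :: gs' =>
    by_cases h : k = x
    · have h1 : pvStep x ((k, c) :: gs') = (x, c + 1) :: gs' := by simp [pvStep, h]
      rw [h1]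
      show pvStep x (pvStep' (k, c) (pvMergeG gs' hs)) = pvStep' (x, c + 1) (pvMergeG gs' hs)
      rw [h]
      exact pvStep_step' x c _
    · have h1 : pvStep x ((k, c) :: gs') = (x, 1) :: (k, c) :: gs' := by
        simp [pvStep, h]
      rw [h1]
      show pvStep x (pvStep' (k, c) (pvMergeG gs' hs))
        = pvStep' (x, 1) (pvStep' (k, c) (pvMergeG gs' hs))
      obtain ⟨c', r', hr⟩ := pvStep'_head (k, c) (pvMergeG gs' hs)
      rw [hr]
      simp [pvStep, pvStep', h]

theorem pvGroups_append (a b : List Bool) :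
    pvGroups (a ++ b) = pvMergeG (pvGroups a) (pvGroups b) := by
  induction a with
  | nil => simp [pvGroups, pvMergeG]
  | cons x a ih =>
    show pvStep x (pvGroups (a ++ b)) = pvMergeG (pvStep x (pvGroups a)) (pvGroups b)
    rw [ih, pvStep_mergeG]

theorem pvGroups_chain' (l : List Bool) :
    List.IsChain (fun a b : Bool × Nat => a.1 ≠ b.1) (pvGroups l) := by
  induction l with
  | nil => exact List.IsChain.nil
  | cons x l ih =>
    show List.IsChain _ (pvStep x (pvGroups l))
    match h : pvGroups l with
    | [] => exact List.isChain_singleton _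
    | (k, c) :: r =>
      rw [h] at ih
      by_cases hk : k = x
      · subst hk
        have h1 : pvStep k ((k, c) :: r) = (k, c + 1) :: r := by simp [pvStep]
        rw [h1]
        match r with
        | [] => exact List.isChain_singleton _
        | r0 :: r' =>
          exact List.isChain_cons_cons.mpr
            ⟨(List.isChain_cons_cons.mp ih).1, (List.isChain_cons_cons.mp ih).2⟩
      · have h1 : pvStep x ((k, c) :: r) = (x, 1) :: (k, c) :: r := by simp [pvStep, hk]
        rw [h1]
        exact List.isChain_cons_cons.mpr ⟨fun he => hk he.symm, ih⟩

theorem pvMergeG_eq (gs hs : List (Bool × Nat)) (h : gs ≠ [])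
    (hc : List.IsChain (fun a b : Bool × Nat => a.1 ≠ b.1) gs) :
    pvMergeG gs hs = gs.dropLast ++ pvStep' (gs.getLast h) hs := by
  match gs with
  | [g] => simp [pvMergeG]
  | g1 :: g2 :: gs' =>
    have hne : (g2 :: gs' : List (Bool × Nat)) ≠ [] := by simp
    have hc2 : List.IsChain (fun a b : Bool × Nat => a.1 ≠ b.1) (g2 :: gs') :=
      (List.isChain_cons_cons.mp hc).2
    have h12 : g1.1 ≠ g2.1 := (List.isChain_cons_cons.mp hc).1
    have ih := pvMergeG_eq (g2 :: gs') hs hne hc2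
    show pvStep' g1 (pvMergeG (g2 :: gs') hs) = _
    rw [ih]
    have hhead : ∃ c r, (g2 :: gs').dropLast ++ pvStep' ((g2 :: gs').getLast hne) hs
        = (g2.1, c) :: r := by
      match gs' with
      | [] =>
        obtain ⟨c, r, hr⟩ := pvStep'_head g2 hs
        exact ⟨c, r, by simpa using hr⟩
      | g3 :: gs'' =>
        exact ⟨g2.2, (g3 :: gs'').dropLast ++ pvStep' ((g2 :: g3 :: gs'').getLast hne) hs,
          by simp⟩
    obtain ⟨c, r, hr⟩ := hhead
    have hL : (g1 :: g2 :: gs').getLast h = (g2 :: gs').getLast hne := List.getLast_cons hne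
    calc pvStep' g1 ((g2 :: gs').dropLast ++ pvStep' ((g2 :: gs').getLast hne) hs)
        = pvStep' g1 ((g2.1, c) :: r) := by rw [hr]
      _ = g1 :: (g2.1, c) :: r := pvStep'_ne g1 g2.1 c r (fun hh => h12 hh.symm)
      _ = g1 :: ((g2 :: gs').dropLast ++ pvStep' ((g2 :: gs').getLast hne) hs) := by rw [hr]
      _ = (g1 :: g2 :: gs').dropLast ++ pvStep' ((g1 :: g2 :: gs').getLast h) hs := by
            rw [hL]; rfl

theorem pvTrueRuns_append (gs hs : List (Bool × Nat)) (i : Int) :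
    pvTrueRuns (gs ++ hs) i = pvTrueRuns gs i ++ pvTrueRuns hs (i + (pvSumc gs : Int)) := by
  induction gs generalizing i with
  | nil => simp [pvTrueRuns, pvSumc]
  | cons g gs ih =>
    obtain ⟨k, c⟩ := g
    simp only [List.cons_append, pvTrueRuns, ih]
    have : i + (c : Int) + (pvSumc gs : Int) = i + (pvSumc ((k, c) :: gs) : Int) := by
      simp [pvSumc]; push_cast; ring
    split_ifs <;> rw [this] <;> simp

-- groups of a cons with a True head, in takeWhile/dropWhile form
theorem pvGroups_cons_true (xs : List Bool) :
    pvGroups (true :: xs)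
      = (true, 1 + (xs.takeWhile (fun x => x)).length) :: pvGroups (xs.dropWhile (fun x => x)) := by
  induction xs with
  | nil => rfl
  | cons y ys ih =>
    cases y
    · obtain ⟨c, r, hr⟩ := pvStep_head false (pvGroups ys)
      have h2 : pvGroups (false :: ys) = (false, c) :: r := hr
      show pvStep true (pvGroups (false :: ys)) = _
      rw [h2]
      simp [pvStep, List.takeWhile, List.dropWhile, h2]
    · have : pvGroups (true :: true :: ys) = pvStep true (pvGroups (true :: ys)) := rfl
      rw [this, ih]
      simp [pvStep, List.takeWhile, List.dropWhile, Nat.add_assoc, Nat.add_comm]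

theorem pvTrueRuns_groups_false (ys : List Bool) (i : Int) :
    pvTrueRuns (pvGroups (false :: ys)) i = pvTrueRuns (pvGroups ys) (i + 1) := by
  show pvTrueRuns (pvStep false (pvGroups ys)) i = _
  match h : pvGroups ys with
  | [] => simp [pvStep, pvTrueRuns]
  | (k, c) :: r =>
    cases k
    · have h1 : pvStep false ((false, c) :: r) = (false, c + 1) :: r := by simp [pvStep]
      rw [h1]
      simp only [pvTrueRuns, Bool.false_eq_true, if_false]
      congr 1
      push_cast; ring
    · have h1 : pvStep false ((true, c) :: r) = (false, 1) :: (true, c) :: r := by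
        simp [pvStep]
      rw [h1]
      simp only [pvTrueRuns, Bool.false_eq_true, if_false, if_true]
      norm_num

theorem pvRunsB_eq (l : List Bool) (i : Int) :
    pvRunsB l i = pvTrueRuns (pvGroups l) i := by
  fun_induction pvRunsB l i
  case case1 => simp [pvGroups, pvTrueRuns]
  case case2 xs i t ih =>
    rw [pvGroups_cons_true]
    have ha : ((1 + (List.takeWhile (fun x => x) xs).length : Nat) : Int)
        = 1 + ((List.takeWhile (fun x => x) xs).length : Int) := by push_cast; ring
    simp only [pvTrueRuns, if_pos rfl, ih, ha]
    have hb : i + (1 + ((List.takeWhile (fun x => x) xs).length : Int))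
        = i + 1 + ((List.takeWhile (fun x => x) xs).length : Int) := by ring
    rw [hb]
    simp only [if_pos trivial]
    rfl
  case case3 b xs i hb ih =>
    cases b
    · rw [ih]
      exact (pvTrueRuns_groups_false xs i).symm
    · exact absurd rfl hb

-- every run of a group list comes from a True group
theorem pvTrueRuns_mem (gs : List (Bool × Nat)) (i : Int) (r : Int × Int)
    (h : r ∈ pvTrueRuns gs i) : ∃ g ∈ gs, g.1 = true ∧ (g.2 : Int) = r.2 := by
  induction gs generalizing i with
  | nil => simp [pvTrueRuns] at h
  | cons g gs ih =>
    obtain ⟨k, c⟩ := g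
    simp only [pvTrueRuns] at h
    cases k
    · obtain ⟨g', hg', hk, hc⟩ := ih _ (by simpa using h)
      exact ⟨g', by simp [hg'], hk, hc⟩
    · rcases (by simpa using h : r = (i, (c : Int)) ∨ r ∈ pvTrueRuns gs (i + c)) with h1 | h2
      · exact ⟨(true, c), by simp, rfl, by simp [h1]⟩
      · obtain ⟨g', hg', hk, hc⟩ := ih _ h2
        exact ⟨g', by simp [hg'], hk, hc⟩

-- every True group yields a run
theorem pvTrueRuns_of_mem (gs : List (Bool × Nat)) (i : Int) (g : Bool × Nat)
    (hg : g ∈ gs) (ht : g.1 = true) : ∃ r ∈ pvTrueRuns gs i, r.2 = (g.2 : Int) := by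
  match gs, hg with
  | (k, c) :: gs', hg =>
    rcases List.mem_cons.mp hg with h1 | h2
    · refine ⟨(i, (c : Int)), ?_, by rw [h1]⟩
      have hk : k = true := by rw [h1] at ht; exact ht
      subst hk
      simp [pvTrueRuns]
    · obtain ⟨r, hr, hr2⟩ := pvTrueRuns_of_mem gs' (i + c) g h2 ht
      refine ⟨r, ?_, hr2⟩
      simp only [pvTrueRuns]
      split_ifs <;> simp [hr]

theorem pvBest_fst_le (rs : List (Int × Int)) (b : Int × Int) : b.1 ≤ (pvBest rs b).1 := by
  induction rs generalizing b with
  | nil => simp [pvBest]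
  | cons r rs ih =>
    simp only [pvBest, List.foldl_cons]
    refine le_trans ?_ (ih _)
    split_ifs with h
    · exact le_of_lt h
    · exact le_refl _

theorem pvBest_mem_le (rs : List (Int × Int)) (b : Int × Int) (r : Int × Int) (h : r ∈ rs) :
    r.2 ≤ (pvBest rs b).1 := by
  induction rs generalizing b with
  | nil => simp at h
  | cons r0 rs ih =>
    rcases List.mem_cons.mp h with h1 | h2
    · subst h1
      simp only [pvBest, List.foldl_cons]
      refine le_trans ?_ (pvBest_fst_le rs _)
      split_ifs with h
      · exact le_refl _
      · exact le_of_not_gt h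
    · exact ih h2 (b := _)

theorem pvBest_no_improve (extra : List (Int × Int)) (B : Int × Int)
    (h : ∀ r ∈ extra, r.2 ≤ B.1) : pvBest extra B = B := by
  induction extra with
  | nil => rfl
  | cons r rs ih =>
    simp only [pvBest, List.foldl_cons]
    rw [if_neg (not_lt.mpr (h r (by simp)))]
    exact ih fun r' hr' => h r' (by simp [hr'])

theorem pvBest_append_absorb (rs extra : List (Int × Int)) (b : Int × Int)
    (h : ∀ r ∈ extra, r.2 ≤ (pvBest rs b).1) : pvBest (rs ++ extra) b = pvBest rs b := by
  show (rs ++ extra).foldl _ b = _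
  rw [List.foldl_append]
  exact pvBest_no_improve extra _ h

-- A's fold over groups, characterised via pvTrueRuns/pvBest
def pvStepA (st : Int × Int × Int) (g : Bool × Nat) : Int × Int × Int :=
  let length : Int := g.2
  let pos := st.2.2 + length
  if g.1 && decide (length > st.1) then (length, pos - length, pos)
  else (st.1, st.2.1, pos)

theorem pvFoldA_eq (gs : List (Bool × Nat)) (m p pos : Int) :
    gs.foldl pvStepA (m, p, pos)
      = ((pvBest (pvTrueRuns gs pos) (m, p)).1, (pvBest (pvTrueRuns gs pos) (m, p)).2,
          pos + (pvSumc gs : Int)) := by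
  induction gs generalizing m p pos with
  | nil => simp [pvTrueRuns, pvBest, pvSumc]
  | cons g gs ih =>
    obtain ⟨k, c⟩ := g
    rw [List.foldl_cons]
    have hsum : pos + (c : Int) + (pvSumc gs : Int) = pos + (pvSumc ((k, c) :: gs) : Int) := by
      simp [pvSumc]; push_cast; ring
    cases k
    · have hstep : pvStepA (m, p, pos) (false, c) = (m, p, pos + (c : Int)) := by
        simp [pvStepA]
      rw [hstep, ih]
      have htr : pvTrueRuns ((false, c) :: gs) pos = pvTrueRuns gs (pos + (c : Int)) := by
        simp [pvTrueRuns]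
      rw [htr, hsum]
    · have htr : pvTrueRuns ((true, c) :: gs) pos
          = (pos, (c : Int)) :: pvTrueRuns gs (pos + (c : Int)) := by
        simp [pvTrueRuns]
      by_cases hgt : (c : Int) > m
      · have hstep : pvStepA (m, p, pos) (true, c) = ((c : Int), pos, pos + (c : Int)) := by
          simp [pvStepA, hgt]
        rw [hstep, ih, htr]
        have hb : pvBest ((pos, (c : Int)) :: pvTrueRuns gs (pos + (c : Int))) (m, p)
            = pvBest (pvTrueRuns gs (pos + (c : Int))) ((c : Int), pos) := by
          simp [pvBest, hgt]
        rw [hb, hsum]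
      · have hstep : pvStepA (m, p, pos) (true, c) = (m, p, pos + (c : Int)) := by
          simp [pvStepA, hgt]
        rw [hstep, ih, htr]
        have hb : pvBest ((pos, (c : Int)) :: pvTrueRuns gs (pos + (c : Int))) (m, p)
            = pvBest (pvTrueRuns gs (pos + (c : Int))) (m, p) := by
          simp [pvBest, hgt]
        rw [hb, hsum]

theorem pvA_eq (pitch : List Bool) :
    find_longest_true_sequence_position_py pitch
      = (pvBest (pvTrueRuns (pvGroups (pitch ++ pitch)) 0) (0, 0)).2 := by
  show ((pvGroups (pitch ++ pitch)).foldl pvStepA (0, 0, 0)).2.1 = _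
  rw [pvFoldA_eq]

theorem pvGroups_cons_exists (x : Bool) (xs : List Bool) :
    ∃ c r, pvGroups (x :: xs) = (x, c) :: r :=
  pvStep_head x (pvGroups xs)

theorem pvGroups_ne_nil (x : Bool) (xs : List Bool) : pvGroups (x :: xs) ≠ [] := by
  obtain ⟨c, r, h⟩ := pvGroups_cons_exists x xs
  simp [h]

theorem pvStep_lastKey (x : Bool) (gs : List (Bool × Nat)) (h : gs ≠ []) :
    (pvStep x gs).getLast?.map (·.1) = gs.getLast?.map (·.1) := by
  match gs with
  | (k, c) :: r =>
    simp only [pvStep]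
    split_ifs with hk
    · match r with
      | [] => simp [hk]
      | r0 :: r' => simp
    · match r with
      | [] => simp
      | r0 :: r' => simp

theorem pvGroups_lastKey (l : List Bool) :
    (pvGroups l).getLast?.map (·.1) = l.getLast? := by
  induction l with
  | nil => rfl
  | cons x xs ih =>
    show (pvStep x (pvGroups xs)).getLast?.map (·.1) = _
    match hx : xs with
    | [] => rfl
    | y :: ys =>
      rw [pvStep_lastKey x _ (pvGroups_ne_nil y ys), ih]
      simp

theorem pvB_nil (pitch : List Bool) (h : pvRunsB pitch 0 = []) :
    find_longest_true_sequence_position_py_alt pitch = 0 := by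
  unfold find_longest_true_sequence_position_py_alt
  rw [h]

theorem pvB_char (pitch : List Bool) (r0 : Int × Int) (rest : List (Int × Int))
    (h : pvRunsB pitch 0 = r0 :: rest) :
    find_longest_true_sequence_position_py_alt pitch
      = (pvBest (if pitch.headD false && pitch.getLastD false then
            (r0 :: rest).dropLast
              ++ [(((r0 :: rest).getLastD (0, 0)).1, ((r0 :: rest).getLastD (0, 0)).2 + r0.2)]
          else r0 :: rest) (0, 0)).2 := by
  unfold find_longest_true_sequence_position_py_alt
  rw [h]
  rfl

theorem pvExtra_bound (Gsub D : List (Bool × Nat)) (L : Bool × Nat) (j : Int)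
    (tail : List (Int × Int))
    (hsub : ∀ g ∈ Gsub, g ∈ D ∨ g = L)
    (hLq : L.1 = true → ∃ q ∈ tail, (L.2 : Int) ≤ q.2) :
    ∀ r ∈ pvTrueRuns Gsub j, r.2 ≤ (pvBest (pvTrueRuns D 0 ++ tail) (0, 0)).1 := by
  intro r hr
  obtain ⟨g, hg, hgt, hgc⟩ := pvTrueRuns_mem Gsub j r hr
  rcases hsub g hg with hD | hL'
  · obtain ⟨r', hr', hr2⟩ := pvTrueRuns_of_mem D 0 g hD hgt
    calc r.2 = r'.2 := by rw [hr2, hgc]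
      _ ≤ _ := pvBest_mem_le _ _ r' (List.mem_append_left _ hr')
  · obtain ⟨q, hq, hle⟩ := hLq (by rw [← hL']; exact hgt)
    calc r.2 = (L.2 : Int) := by rw [← hgc, hL']
      _ ≤ q.2 := hle
      _ ≤ _ := pvBest_mem_le _ _ q (List.mem_append_right _ hq)

theorem pvMain (pitch : List Bool) :
    find_longest_true_sequence_position_py pitch
      = find_longest_true_sequence_position_py_alt pitch := by
  match pitch with
  | [] =>
    rw [pvB_nil [] (by simp [pvRunsB])]
    rfl
  | x :: xs =>
    obtain ⟨hc, Gt, hG2⟩ := pvGroups_cons_exists x xs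
    have hGne : pvGroups (x :: xs) ≠ [] := pvGroups_ne_nil x xs
    have hA : find_longest_true_sequence_position_py (x :: xs)
        = (pvBest (pvTrueRuns (pvGroups (x :: xs)).dropLast 0
            ++ pvTrueRuns (pvStep' ((pvGroups (x :: xs)).getLast hGne) (pvGroups (x :: xs)))
                 (0 + (pvSumc (pvGroups (x :: xs)).dropLast : Int))) (0, 0)).2 := by
      rw [pvA_eq, pvGroups_append, pvMergeG_eq _ _ hGne (pvGroups_chain' _), pvTrueRuns_append]
    set L := (pvGroups (x :: xs)).getLast hGne with hLdef
    set D := (pvGroups (x :: xs)).dropLast with hDdef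
    set s : Int := 0 + (pvSumc D : Int) with hsdef
    have hGD : D ++ [L] = pvGroups (x :: xs) := List.dropLast_append_getLast hGne
    have hR : pvRunsB (x :: xs) 0 = pvTrueRuns (pvGroups (x :: xs)) 0 := pvRunsB_eq _ _
    have hRsplit : pvTrueRuns (pvGroups (x :: xs)) 0
        = pvTrueRuns D 0 ++ pvTrueRuns [L] s := by
      conv_lhs => rw [← hGD]
      rw [pvTrueRuns_append]
    have hlastkey : (x :: xs).getLastD false = L.1 := by
      have h1 := pvGroups_lastKey (x :: xs)
      rw [List.getLast?_eq_some_getLast hGne] at h1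
      rw [List.getLastD_eq_getLast?, ← h1]
      rfl
    have hsub0 : ∀ g ∈ pvGroups (x :: xs), g ∈ D ∨ g = L := by
      intro g hg
      rw [← hGD] at hg
      rcases List.mem_append.mp hg with h | h
      · exact Or.inl h
      · exact Or.inr (by simpa using h)
    cases hLb : L.1 with
    | true =>
      have hLpair : L = (true, L.2) := by rw [← hLb]
      have hsingle : pvTrueRuns [L] s = [(s, (L.2 : Int))] := by
        rw [hLpair]; simp [pvTrueRuns]
      have hR2 : pvTrueRuns (pvGroups (x :: xs)) 0 = pvTrueRuns D 0 ++ [(s, (L.2 : Int))] := by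
        rw [hRsplit, hsingle]
      cases x with
      | true =>
        -- wrap case: both first and last element are True
        have hstep : pvStep' L (pvGroups (true :: xs)) = (true, hc + L.2) :: Gt := by
          rw [hG2, hLpair]
          simp [pvStep']
        have hheadruns : pvTrueRuns (pvGroups (true :: xs)) 0
            = (0, (hc : Int)) :: pvTrueRuns Gt (0 + (hc : Int)) := by
          rw [hG2]; simp [pvTrueRuns]
        have hB := pvB_char (true :: xs) (0, (hc : Int)) (pvTrueRuns Gt (0 + (hc : Int)))
          (hR.trans hheadruns)
        have hcond : ((true :: xs).headD false && (true :: xs).getLastD false) = true := by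
          rw [hlastkey, hLb]; rfl
        rw [hcond, if_pos rfl] at hB
        have hlist : ((0, (hc : Int)) :: pvTrueRuns Gt (0 + (hc : Int)))
            = pvTrueRuns D 0 ++ [(s, (L.2 : Int))] := hheadruns.symm.trans hR2
        rw [hlist, List.dropLast_concat, List.getLastD_concat] at hB
        rw [hA, hstep]
        have htr : pvTrueRuns ((true, hc + L.2) :: Gt) s
            = (s, ((hc + L.2 : Nat) : Int)) :: pvTrueRuns Gt (s + ((hc + L.2 : Nat) : Int)) := by
          simp [pvTrueRuns]
        rw [htr]
        have hval : ((hc + L.2 : Nat) : Int) = (L.2 : Int) + (hc : Int) := by push_cast; ring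
        rw [hval, List.append_cons]
        rw [pvBest_append_absorb]
        · rw [hB]
        · refine pvExtra_bound Gt D L _ [(s, (L.2 : Int) + (hc : Int))] ?_ ?_
          · intro g hg
            exact hsub0 g (by rw [hG2]; exact List.mem_cons_of_mem _ hg)
          · intro _
            exact ⟨(s, (L.2 : Int) + (hc : Int)), by simp,
              le_add_of_nonneg_right (Int.natCast_nonneg hc)⟩
      | false =>
        -- last is True, first is False: no wrap merge
        have hstep : pvStep' L (pvGroups (false :: xs)) = L :: pvGroups (false :: xs) := by
          rw [hG2]
          exact pvStep'_ne L false hc Gt (by rw [hLb]; simp)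
        obtain ⟨r0, rest, hcons⟩ :
            ∃ r0 rest, pvTrueRuns D 0 ++ [(s, (L.2 : Int))] = r0 :: rest := by
          match h : pvTrueRuns D 0 ++ [(s, (L.2 : Int))] with
          | [] => exact absurd h (by simp)
          | r0 :: rest => exact ⟨r0, rest, rfl⟩
        have hB := pvB_char (false :: xs) r0 rest (by rw [hR, hR2, hcons])
        have hcond : ((false :: xs).headD false && (false :: xs).getLastD false) = false := rfl
        rw [hcond] at hB
        simp only [Bool.false_eq_true, if_false] at hB
        rw [hA, hstep]
        have htr : pvTrueRuns (L :: pvGroups (false :: xs)) s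
            = (s, (L.2 : Int)) :: pvTrueRuns (pvGroups (false :: xs)) (s + (L.2 : Int)) := by
          conv_lhs => rw [hLpair]
          simp [pvTrueRuns]
        rw [htr, List.append_cons]
        rw [pvBest_append_absorb]
        · rw [hB, ← hcons]
        · exact pvExtra_bound (pvGroups (false :: xs)) D L _ [(s, (L.2 : Int))] hsub0
            (fun _ => ⟨(s, (L.2 : Int)), by simp, le_refl _⟩)
    | false =>
      have hLpair : L = (false, L.2) := by rw [← hLb]
      have hsingle : pvTrueRuns [L] s = [] := by
        rw [hLpair]; simp [pvTrueRuns]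
      have hR2 : pvTrueRuns (pvGroups (x :: xs)) 0 = pvTrueRuns D 0 := by
        rw [hRsplit, hsingle, List.append_nil]
      -- B returns the best over the unmodified runs
      have hB : find_longest_true_sequence_position_py_alt (x :: xs)
          = (pvBest (pvTrueRuns D 0) (0, 0)).2 := by
        match hRB : pvRunsB (x :: xs) 0 with
        | [] =>
          have hDnil : pvTrueRuns D 0 = [] := by rw [← hR2, ← hR, hRB]
          rw [pvB_nil _ hRB, hDnil]
          rfl
        | r0 :: rest =>
          have hB1 := pvB_char (x :: xs) r0 rest hRB
          have hcond : ((x :: xs).headD false && (x :: xs).getLastD false) = false := by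
            rw [hlastkey, hLb, Bool.and_false]
          rw [hcond] at hB1
          simp only [Bool.false_eq_true, if_false] at hB1
          rw [hB1, ← hRB, hR, hR2]
      rw [hA, hB]
      cases x with
      | false =>
        have hstep : pvStep' L (pvGroups (false :: xs)) = (L.1, hc + L.2) :: Gt := by
          rw [hG2]
          simp [pvStep', hLb]
        rw [hstep]
        have htr : pvTrueRuns ((L.1, hc + L.2) :: Gt) s
            = pvTrueRuns Gt (s + ((hc + L.2 : Nat) : Int)) := by
          rw [hLb]; simp [pvTrueRuns]
        rw [htr]
        rw [pvBest_append_absorb]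
        have hb := pvExtra_bound Gt D L (s + ((hc + L.2 : Nat) : Int)) []
          (fun g hg => hsub0 g (by rw [hG2]; exact List.mem_cons_of_mem _ hg))
          (fun h => absurd (hLb ▸ h) (by simp))
        rwa [List.append_nil] at hb
      | true =>
        have hstep : pvStep' L (pvGroups (true :: xs)) = L :: pvGroups (true :: xs) := by
          rw [hG2]
          exact pvStep'_ne L true hc Gt (by rw [hLb]; simp)
        rw [hstep]
        have htr : pvTrueRuns (L :: pvGroups (true :: xs)) s
            = pvTrueRuns (pvGroups (true :: xs)) (s + (L.2 : Int)) := by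
          conv_lhs => rw [hLpair]
          simp [pvTrueRuns]
        rw [htr]
        rw [pvBest_append_absorb]
        have hb := pvExtra_bound (pvGroups (true :: xs)) D L (s + (L.2 : Int)) [] hsub0
          (fun h => absurd (hLb ▸ h) (by simp))
        rwa [List.append_nil] at hb

-- ===== VERDICT (by name: the statement is the Claim_ definition above) =====
theorem find_longest_true_sequence_position_py_spec : Claim_equal_find_longest_true_sequence_position_py := by
  intro pitch _
  show find_longest_true_sequence_position_py pitch = _
  exact pvMain pitch
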